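-- pv_equiv track=rewrite | github.com/Jane11111/Leetcode2021 | Offer020.py | onlyOp
-- ===== SOURCE A (Python) =====
-- def onlyOp(s):
--
--     op_count = 0
--     for c in s:
--         if c == '+' or c == '-':
--             op_count+=1
--         elif c!= ' ' and not c.isdigit():
--             return False
--     return op_count ==1
-- ===== SOURCE B (Python) =====
-- def onlyOp(s):
--     ops = s.count('+') + s.count('-')
--     valid = all(c == ' ' or c.isdigit() or c in '+-' for c in s)
--     return ops == 1 and valid
-- ===== Notes on version B (the rewrite author's own statement) =====
-- stated objective: idiomatic
-- what changed: Replaces A's single early-returning loop with an accumulator by a count-first structure: the operator count is taken with two library str.count calls and validity is a separate all(...) scan, combined at the end.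
import Mathlib
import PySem

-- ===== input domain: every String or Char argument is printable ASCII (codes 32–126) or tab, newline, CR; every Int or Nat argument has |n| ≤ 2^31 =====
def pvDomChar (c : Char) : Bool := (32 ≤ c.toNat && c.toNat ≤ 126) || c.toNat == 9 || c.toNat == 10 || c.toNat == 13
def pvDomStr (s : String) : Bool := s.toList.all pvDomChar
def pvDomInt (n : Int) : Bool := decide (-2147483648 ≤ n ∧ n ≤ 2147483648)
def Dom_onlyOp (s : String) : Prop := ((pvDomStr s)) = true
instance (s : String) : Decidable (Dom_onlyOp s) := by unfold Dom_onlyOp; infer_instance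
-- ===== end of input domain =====

-- B replaces A's single early-returning loop by an idiomatic count-then-validate structure
-- (two library count calls plus a separate all-characters-allowed scan); same O(n) cost.


-- ===== PORT A =====
-- the for-loop with early 'return False' and the op_count accumulator, step for step
def onlyOpLoopA : List Char → Int → Bool
  | [], opCount => opCount == 1
  | c :: rest, opCount =>
    if c == '+' || c == '-' then onlyOpLoopA rest (opCount + 1)
    else if c != ' ' && !(PySem.Chars.isdigit c) then false
    else onlyOpLoopA rest opCount

def onlyOp (s : String) : Bool := onlyOpLoopA s.toList 0

-- ===== PORT B =====
def onlyOp_alt (s : String) : Bool :=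
  let ops : Int := (PySem.Str.count s "+" : Int) + (PySem.Str.count s "-" : Int)
  let valid : Bool := s.toList.all
    (fun c => c == ' ' || PySem.Chars.isdigit c || c == '+' || c == '-')
  ops == 1 && valid

-- ===== PRECONDITION & SPEC =====
def Spec_onlyOp (s : String) (out : Bool) : Prop := out = onlyOp_alt s
instance (s : String) (out : Bool) : Decidable (Spec_onlyOp s out) := by unfold Spec_onlyOp; infer_instance

-- ===== CLAIM (what is proved, stated in full; the proofs are below) =====
def Claim_equal_onlyOp : Prop := ∀ (s : String), Dom_onlyOp s → Spec_onlyOp s (onlyOp s)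

-- ===== LEMMAS AND PROOFS =====

-- PySem.Chars.count with a one-character pattern is List.count
theorem count_go_single (c : Char) (fuel : Nat) : ∀ (l : List Char) (acc : Nat),
    l.length ≤ fuel → PySem.Chars.count.go [c] fuel l acc = acc + l.count c := by
  induction fuel with
  | zero =>
    intro l acc h
    cases l with
    | nil => simp [PySem.Chars.count.go]
    | cons d t => simp at h
  | succ fuel ih =>
    intro l acc h
    cases l with
    | nil => simp [PySem.Chars.count.go]
    | cons d t =>
      have ht : t.length ≤ fuel := by simpa using h
      simp only [PySem.Chars.count.go]
      by_cases hd : d = c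
      · rw [if_pos (by simp [List.isPrefixOf, hd])]
        simp only [List.length_singleton, List.drop_succ_cons, List.drop_zero]
        rw [ih t (acc + 1) ht]
        simp [hd]
        omega
      · rw [if_neg (by simp [List.isPrefixOf]; exact fun hh => hd hh.symm)]
        rw [ih t acc ht]
        simp [hd]

theorem chars_count_single (l : List Char) (c : Char) :
    PySem.Chars.count l [c] = l.count c := by
  simp only [PySem.Chars.count, List.isEmpty_cons]
  simpa using count_go_single c l.length l 0 le_rfl

-- the allowed-character test B uses
def pvValid (c : Char) : Bool :=
  c == ' ' || PySem.Chars.isdigit c || c == '+' || c == '-'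

-- the loop invariant: A's loop equals "count the ops, and every char is allowed"
theorem loopA_char (l : List Char) : ∀ (n : Int),
    onlyOpLoopA l n
      = ((n + (l.count '+' : Int) + (l.count '-' : Int)) == 1 && l.all pvValid) := by
  induction l with
  | nil => intro n; simp [onlyOpLoopA]
  | cons c t ih =>
    intro n
    by_cases hop : c = '+' ∨ c = '-'
    · have hA : onlyOpLoopA (c :: t) n = onlyOpLoopA t (n + 1) := by
        rcases hop with h | h <;> simp [onlyOpLoopA, h]
      rw [hA, ih]
      rcases hop with h | h <;> subst h <;>
        simp only [List.count_cons, List.all_cons, pvValid] <;>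
        [ rw [show n + 1 + ((t.count '+' : Int)) + ((t.count '-' : Int))
                = n + ((t.count '+' : Int) + 1) + ((t.count '-' : Int)) from by ring]
        ; rw [show n + 1 + ((t.count '+' : Int)) + ((t.count '-' : Int))
                = n + ((t.count '+' : Int)) + ((t.count '-' : Int) + 1) from by ring]] <;>
        simp
    · push Not at hop
      by_cases hv : c = ' ' ∨ PySem.Chars.isdigit c = true
      · have hA : onlyOpLoopA (c :: t) n = onlyOpLoopA t n := by
          rcases hv with h | h <;> simp [onlyOpLoopA, hop.1, hop.2, h]
        rw [hA, ih]
        simp [hop.1, hop.2, List.all_cons, pvValid]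
        rcases hv with h | h <;> simp [h]
      · push Not at hv
        have hA : onlyOpLoopA (c :: t) n = false := by
          simp [onlyOpLoopA, hop.1, hop.2, hv.1, hv.2]
        rw [hA]
        simp [List.all_cons, pvValid, hop.1, hop.2, hv.1, hv.2]

-- ===== VERDICT (by name: the statement is the Claim_ definition above) =====
theorem onlyOp_spec : Claim_equal_onlyOp := by
  intro s _
  unfold Spec_onlyOp onlyOp onlyOp_alt
  rw [loopA_char]
  simp only [PySem.Str.count_eq, show ("+" : String).toList = ['+'] from rfl,
    show ("-" : String).toList = ['-'] from rfl, chars_count_single]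
  simp only [show pvValid
      = (fun c => c == ' ' || PySem.Chars.isdigit c || c == '+' || c == '-') from rfl]
  norm_num
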